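-- pv_equiv track=rewrite | github.com/SakuraMathcraft/LaTeXSnipper | src/core/mathcraft_tex_exporter.py | _convert_inline_markdown
-- ===== SOURCE A (Python) =====
-- def _convert_inline_markdown(text: str) -> str:
--     parts: list[str] = []
--     pos = 0
--     while pos < len(text):
--         start = _find_unescaped_dollar(text, pos)
--         if start < 0:
--             parts.append(_escape_markdown_text(text[pos:]))
--             break
--         end = _find_unescaped_dollar(text, start + 1)
--         if end < 0:
--             parts.append(_escape_markdown_text(text[pos:]))
--             break
--         parts.append(_escape_markdown_text(text[pos:start]))
--         math_body = text[start + 1 : end].strip()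
--         parts.append(f"${math_body}$")
--         pos = end + 1
--     return "".join(parts).strip()
--
-- def _find_unescaped_dollar(text: str, start: int) -> int:
--     pos = start
--     while True:
--         idx = text.find("$", pos)
--         if idx < 0:
--             return -1
--         if idx == 0 or text[idx - 1] != "\\":
--             return idx
--         pos = idx + 1
--
-- def _escape_markdown_text(text: str) -> str:
--     result: list[str] = []
--     pos = 0
--     while pos < len(text):
--         start = text.find("**", pos)
--         if start < 0:
--             result.append(_escape_latex_text(text[pos:]))
--             break
--         end = text.find("**", start + 2)
--         if end < 0:
--             result.append(_escape_latex_text(text[pos:]))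
--             break
--         result.append(_escape_latex_text(text[pos:start]))
--         bold_text = text[start + 2 : end].strip()
--         result.append(f"\\textbf{{{_escape_latex_text(bold_text)}}}")
--         pos = end + 2
--     return "".join(result)
--
-- def _escape_latex_text(text: str) -> str:
--     replacements = {
--         "\\": r"\textbackslash{}",
--         "&": r"\&",
--         "%": r"\%",
--         "#": r"\#",
--         "_": r"\_",
--         "{": r"\{",
--         "}": r"\}",
--         "~": r"\textasciitilde{}",
--         "^": r"\textasciicircum{}",
--     }
--     return "".join(replacements.get(ch, ch) for ch in text)
-- ===== SOURCE B (Python) =====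
-- # B: instead of repeated .find scanning, precompute the index lists of unescaped '$'
-- # and of '**' occurrences once, pair them (consecutively for '$', greedily for '**'
-- # by popping a reversed index stack), and assemble the output from slices.
--
-- _TR = str.maketrans({
--     "\\": r"\textbackslash{}",
--     "&": r"\&",
--     "%": r"\%",
--     "#": r"\#",
--     "_": r"\_",
--     "{": r"\{",
--     "}": r"\}",
--     "~": r"\textasciitilde{}",
--     "^": r"\textasciicircum{}",
-- })
--
--
-- def _esc(t: str) -> str:
--     return t.translate(_TR)
--
--
-- def _greedy_pairs(occ: list) -> list:
--     """Greedy left-to-right pairing of '**' positions, consecutive pairs at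
--     distance >= 2; occ is sorted ascending."""
--     stack = occ[::-1]  # top of stack = leftmost position
--     pairs = []
--     while stack:
--         s = stack.pop()
--         while stack and stack[-1] < s + 2:
--             stack.pop()
--         if not stack:
--             break
--         e = stack.pop()
--         while stack and stack[-1] < e + 2:
--             stack.pop()
--         pairs.append((s, e))
--     return pairs
--
--
-- def _pairs2(ds: list) -> list:
--     """Consecutive disjoint pairs (ds[0],ds[1]), (ds[2],ds[3]), ..."""
--     stack = ds[::-1]
--     pairs = []
--     while len(stack) >= 2:
--         a = stack.pop()
--         b = stack.pop()
--         pairs.append((a, b))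
--     return pairs
--
--
-- def _escape_segment(seg: str) -> str:
--     occ = [i for i in range(len(seg) - 1) if seg[i] == "*" and seg[i + 1] == "*"]
--     out = []
--     pos = 0
--     for s, e in _greedy_pairs(occ):
--         out.append(_esc(seg[pos:s]))
--         out.append("\\textbf{" + _esc(seg[s + 2:e].strip()) + "}")
--         pos = e + 2
--     out.append(_esc(seg[pos:]))
--     return "".join(out)
--
--
-- def _convert_inline_markdown(text: str) -> str:
--     dollars = [i for i in range(len(text))
--                if text[i] == "$" and (i == 0 or text[i - 1] != "\\")]
--     out = []
--     pos = 0
--     for a, b in _pairs2(dollars):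
--         out.append(_escape_segment(text[pos:a]))
--         out.append("$" + text[a + 1:b].strip() + "$")
--         pos = b + 1
--     out.append(_escape_segment(text[pos:]))
--     return "".join(out).strip()
-- ===== Notes on version B (the rewrite author's own statement) =====
-- stated objective: alternative
-- what changed: A repeatedly rescans the string with .find inside nested while loops; B precomputes the index lists of unescaped '$' and of '**' occurrences in one comprehension each, pairs them (consecutively for '$', greedily via a reversed index stack for '**'), and assembles the output from slices.
import Mathlib
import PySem

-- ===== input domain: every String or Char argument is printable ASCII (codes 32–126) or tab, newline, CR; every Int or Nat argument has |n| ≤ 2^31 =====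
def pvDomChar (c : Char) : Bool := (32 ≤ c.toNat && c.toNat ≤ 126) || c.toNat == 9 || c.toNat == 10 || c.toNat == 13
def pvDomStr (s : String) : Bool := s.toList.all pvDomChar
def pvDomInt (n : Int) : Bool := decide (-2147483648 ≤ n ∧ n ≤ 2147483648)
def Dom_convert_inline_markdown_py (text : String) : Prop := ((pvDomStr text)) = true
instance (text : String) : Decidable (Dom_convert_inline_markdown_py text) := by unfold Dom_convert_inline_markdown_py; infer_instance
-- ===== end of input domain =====

-- B re-implements A by precomputing the index lists of unescaped '$' and of '**'
-- occurrences once and pairing them, instead of A's repeated .find scanning;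
-- same return value, no speed claim.

-- ===== PORT A =====

-- `_escape_latex_text`: per-character replacement table, joined.
def pvRepl (c : Char) : List Char :=
  if c = '\\' then "\\textbackslash{}".toList
  else if c = '&' then "\\&".toList
  else if c = '%' then "\\%".toList
  else if c = '#' then "\\#".toList
  else if c = '_' then "\\_".toList
  else if c = '{' then "\\{".toList
  else if c = '}' then "\\}".toList
  else if c = '~' then "\\textasciitilde{}".toList
  else if c = '^' then "\\textasciicircum{}".toList
  else [c]

def escLatexA (l : List Char) : List Char := (l.map pvRepl).flatten

-- termination helper for the `.find(sub, pos)` loops (cited in decreasing_by):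
-- a successful find lies between `pos` and `len - len(sub)`.
lemma pvFindFrom_bounds (l sub : List Char) (k : Nat) (hsub : sub ≠ [])
    (h : ¬ PySem.Chars.findFrom l sub (k : Int) none < 0) :
    k ≤ l.length ∧ k ≤ (PySem.Chars.findFrom l sub (k : Int) none).toNat ∧
      (PySem.Chars.findFrom l sub (k : Int) none).toNat + sub.length ≤ l.length := by
  have hk : k ≤ l.length := by
    by_contra hgt
    have : PySem.Chars.findFrom l sub (k : Int) none = -1 := by
      simp only [PySem.Chars.findFrom]
      split_ifs with h1 h2 <;> omega
    omega
  have hne : PySem.Chars.findFrom l sub (k : Int) none ≠ -1 := by omega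
  obtain ⟨h1, h2, -⟩ := PySem.Chars.findFrom_natCast_spec l sub k hk hne
  have hlen := h2.length_le
  simp only [List.length_drop] at hlen
  have hsl : 1 ≤ sub.length := by cases sub with | nil => simp at hsub | cons a t => simp
  refine ⟨hk, by omega, by omega⟩

-- `_find_unescaped_dollar` (positions are Nat: Python's are ints that stay ≥ 0 here)
def findUnescA (l : List Char) (pos : Nat) : Int :=
  let idx := PySem.Chars.findFrom l ['$'] (pos : Int) none
  if h0 : idx < 0 then -1
  else if idx = 0 ∨ PySem.List.pyGet? l (idx - 1) ≠ some '\\' then idx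
  else findUnescA l (idx.toNat + 1)
termination_by l.length + 1 - pos
decreasing_by
  have := pvFindFrom_bounds l ['$'] pos (by simp) h0
  simp only [List.length_cons, List.length_nil] at this
  omega

lemma findUnescA_bounds (l : List Char) (pos : Nat) (h : ¬ findUnescA l pos < 0) :
    pos ≤ (findUnescA l pos).toNat ∧ (findUnescA l pos).toNat < l.length := by
  fun_induction findUnescA l pos with
  | case1 pos idx h0 => simp_all
  | case2 pos idx h0 hcond =>
    have hidx : idx = PySem.Chars.findFrom l ['$'] (pos : Int) none := rfl
    have := pvFindFrom_bounds l ['$'] pos (by simp) (hidx ▸ h0)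
    simp only [List.length_cons, List.length_nil] at this
    rw [hidx] at h ⊢
    omega
  | case3 pos idx h0 hcond ih =>
    have hidx : idx = PySem.Chars.findFrom l ['$'] (pos : Int) none := rfl
    have := pvFindFrom_bounds l ['$'] pos (by simp) (hidx ▸ h0)
    simp only [List.length_cons, List.length_nil] at this
    have := ih h
    rw [hidx] at *
    omega

-- `_escape_markdown_text`: while loop over '**' pairs, result parts joined at the end
def escMdA_loop (l : List Char) (pos : Nat) (res : List (List Char)) : List (List Char) :=
  if pos < l.length then
    let start := PySem.Chars.findFrom l ['*', '*'] (pos : Int) none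
    if h0 : start < 0 then res ++ [escLatexA (PySem.List.slice l (some (pos : Int)) none)]
    else
      let endd := PySem.Chars.findFrom l ['*', '*'] ((start.toNat + 2 : Nat) : Int) none
      if h1 : endd < 0 then res ++ [escLatexA (PySem.List.slice l (some (pos : Int)) none)]
      else
        escMdA_loop l (endd.toNat + 2)
          (res ++ [escLatexA (PySem.List.slice l (some (pos : Int)) (some start)),
            "\\textbf{".toList ++
              escLatexA (PySem.Chars.strip
                (PySem.List.slice l (some ((start.toNat + 2 : Nat) : Int)) (some endd))) ++ ['}']])
  else res
termination_by l.length + 1 - pos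
decreasing_by
  have hA := pvFindFrom_bounds l ['*', '*'] pos (by simp) h0
  have hB := pvFindFrom_bounds l ['*', '*']
      ((PySem.Chars.findFrom l ['*', '*'] (pos : Int) none).toNat + 2) (by simp) h1
  simp only [List.length_cons, List.length_nil] at hA hB
  omega

def escMdA (l : List Char) : List Char := (escMdA_loop l 0 []).flatten

-- `_convert_inline_markdown`: while loop over unescaped-'$' pairs
def convA_loop (l : List Char) (pos : Nat) (parts : List (List Char)) : List (List Char) :=
  if pos < l.length then
    let start := findUnescA l pos
    if h0 : start < 0 then parts ++ [escMdA (PySem.List.slice l (some (pos : Int)) none)]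
    else
      let endd := findUnescA l (start.toNat + 1)
      if h1 : endd < 0 then parts ++ [escMdA (PySem.List.slice l (some (pos : Int)) none)]
      else
        convA_loop l (endd.toNat + 1)
          (parts ++ [escMdA (PySem.List.slice l (some (pos : Int)) (some start)),
            '$' :: PySem.Chars.strip
              (PySem.List.slice l (some ((start.toNat + 1 : Nat) : Int)) (some endd)) ++ ['$']])
  else parts
termination_by l.length + 1 - pos
decreasing_by
  have hA := findUnescA_bounds l pos h0
  have hB := findUnescA_bounds l ((findUnescA l pos).toNat + 1) h1
  omega

def convert_inline_markdown_py (text : String) : String :=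
  String.ofList (PySem.Chars.strip ((convA_loop text.toList 0 []).flatten))

-- ===== PORT B =====

-- `_esc` via the translate table (same character map, applied as a flatMap)
def pvReplB (c : Char) : List Char :=
  match c with
  | '\\' => "\\textbackslash{}".toList
  | '&' => "\\&".toList
  | '%' => "\\%".toList
  | '#' => "\\#".toList
  | '_' => "\\_".toList
  | '{' => "\\{".toList
  | '}' => "\\}".toList
  | '~' => "\\textasciitilde{}".toList
  | '^' => "\\textasciicircum{}".toList
  | c => [c]

def escB (l : List Char) : List Char := l.flatMap pvReplB

-- index list of unescaped '$' (the comprehension; indices are in range, so getD is exact)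
def dollarIdxB (l : List Char) : List Nat :=
  (List.range l.length).filter
    (fun i => decide (l.getD i ' ' = '$' ∧ (i = 0 ∨ l.getD (i - 1) ' ' ≠ '\\')))

-- index list of '**' occurrences
def starIdxB (l : List Char) : List Nat :=
  (List.range (l.length - 1)).filter
    (fun i => decide (l.getD i ' ' = '*' ∧ l.getD (i + 1) ' ' = '*'))

-- `_greedy_pairs`: the reversed python stack pops from the end, i.e. consumes this
-- sorted list from the front; the inner skip-while loops are dropWhile.
def greedyGoB (stack : List Nat) (pairs : List (Nat × Nat)) : List (Nat × Nat) :=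
  match stack with
  | [] => pairs
  | s :: rest =>
    match h : rest.dropWhile (fun o => decide (o < s + 2)) with
    | [] => pairs
    | e :: rest2 => greedyGoB (rest2.dropWhile (fun o => decide (o < e + 2))) (pairs ++ [(s, e)])
termination_by stack.length
decreasing_by
  have h1 := List.length_dropWhile_le (fun o => decide (o < e + 2)) rest2
  have h2 := List.length_dropWhile_le (fun o => decide (o < s + 2)) rest
  rw [h] at h2
  simp only [List.length_cons] at *
  omega

-- `_pairs2`: pop two at a time from the reversed stack
def pairUpGoB (stack : List Nat) (pairs : List (Nat × Nat)) : List (Nat × Nat) :=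
  match stack with
  | a :: b :: rest => pairUpGoB rest (pairs ++ [(a, b)])
  | _ => pairs

-- `_escape_segment`: fold over the greedy pairs with (pos, out) state
def escSegB (seg : List Char) : List Char :=
  let st := (greedyGoB (starIdxB seg) []).foldl
    (fun (acc : Nat × List (List Char)) se =>
      (se.2 + 2, acc.2 ++ [escB (PySem.List.slice seg (some (acc.1 : Int)) (some (se.1 : Int))),
        "\\textbf{".toList ++
          escB (PySem.Chars.strip
            (PySem.List.slice seg (some ((se.1 + 2 : Nat) : Int)) (some (se.2 : Int)))) ++ ['}']]))
    (0, ([] : List (List Char)))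
  (st.2 ++ [escB (PySem.List.slice seg (some (st.1 : Int)) none)]).flatten

def convert_inline_markdown_py_alt (text : String) : String :=
  let l := text.toList
  let st := (pairUpGoB (dollarIdxB l) []).foldl
    (fun (acc : Nat × List (List Char)) ab =>
      (ab.2 + 1, acc.2 ++ [escSegB (PySem.List.slice l (some (acc.1 : Int)) (some (ab.1 : Int))),
        '$' :: PySem.Chars.strip
          (PySem.List.slice l (some ((ab.1 + 1 : Nat) : Int)) (some (ab.2 : Int))) ++ ['$']]))
    (0, ([] : List (List Char)))
  String.ofList (PySem.Chars.strip
    ((st.2 ++ [escSegB (PySem.List.slice l (some (st.1 : Int)) none)]).flatten))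

-- ===== PRECONDITION & SPEC =====
def Spec_convert_inline_markdown_py (text : String) (out : String) : Prop := out = convert_inline_markdown_py_alt text
instance (text : String) (out : String) : Decidable (Spec_convert_inline_markdown_py text out) := by unfold Spec_convert_inline_markdown_py; infer_instance

-- ===== CLAIM (what is proved, stated in full; the proofs are below) =====
def Claim_equal_convert_inline_markdown_py : Prop := ∀ (text : String), Dom_convert_inline_markdown_py text → Spec_convert_inline_markdown_py text (convert_inline_markdown_py text)

-- ===== LEMMAS AND PROOFS =====

-- escaper equality: B's translate table is A's replacement map
lemma pvReplB_eq (c : Char) : pvReplB c = pvRepl c := by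
  unfold pvReplB pvRepl
  split <;> simp_all

lemma pvEsc_eq (l : List Char) : escLatexA l = escB l := by
  unfold escLatexA escB
  rw [List.flatMap_def]
  exact congrArg _ (List.map_congr_left fun c _ => (pvReplB_eq c).symm)

-- one- and two-character prefixes of a drop
lemma pvPrefix_one_iff (t : List Char) (c : Char) : [c] <+: t ↔ t.head? = some c := by
  cases t <;> simp [List.cons_prefix_iff]

lemma pvPrefix_two_iff (t : List Char) (c d : Char) :
    [c, d] <+: t ↔ t.head? = some c ∧ t.tail.head? = some d := by
  cases t with
  | nil => simp
  | cons x xs => cases xs <;> simp [List.cons_prefix_iff]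

lemma pvInfix_drop_iff (sub s : List Char) : sub <:+: s ↔ ∃ j, sub <+: s.drop j := by
  rw [← PySem.Chars.isIn_iff_infix, ← PySem.Chars.exists_prefix_drop_iff_isIn]

-- the index lists are sorted
lemma pvSorted_dollar (l : List Char) : (dollarIdxB l).Pairwise (· < ·) :=
  List.Pairwise.filter _ List.pairwise_lt_range

lemma pvSorted_star (l : List Char) : (starIdxB l).Pairwise (· < ·) :=
  List.Pairwise.filter _ List.pairwise_lt_range

-- membership characterizations
lemma pvMem_star (l : List Char) (i : Nat) : i ∈ starIdxB l ↔ ['*', '*'] <+: l.drop i := by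
  rw [pvPrefix_two_iff, List.head?_drop, List.tail_drop, List.head?_drop]
  simp only [starIdxB, List.mem_filter, List.mem_range, decide_eq_true_eq,
    List.getD_eq_getElem?_getD]
  constructor
  · rintro ⟨hi, h1, h2⟩
    have hi1 : i + 1 < l.length := by omega
    have hi0 : i < l.length := by omega
    rw [List.getElem?_eq_getElem hi0] at h1 ⊢
    rw [List.getElem?_eq_getElem hi1] at h2 ⊢
    simp_all
  · rintro ⟨h1, h2⟩
    have hi1 : i + 1 < l.length := by
      by_contra hc
      rw [List.getElem?_eq_none (by omega)] at h2
      simp at h2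
    have hi0 : i < l.length := by omega
    rw [List.getElem?_eq_getElem hi0] at h1
    rw [List.getElem?_eq_getElem hi1] at h2
    simp_all
    omega

lemma pvMem_dollar (l : List Char) (i : Nat) :
    i ∈ dollarIdxB l ↔ ['$'] <+: l.drop i ∧ (i = 0 ∨ l.getD (i - 1) ' ' ≠ '\\') := by
  rw [pvPrefix_one_iff, List.head?_drop]
  simp only [dollarIdxB, List.mem_filter, List.mem_range, decide_eq_true_eq,
    List.getD_eq_getElem?_getD]
  constructor
  · rintro ⟨hi, h1, h2⟩
    rw [List.getElem?_eq_getElem hi] at h1 ⊢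
    simp_all
  · rintro ⟨h1, h2⟩
    have hi0 : i < l.length := by
      by_contra hc
      rw [List.getElem?_eq_none (by omega)] at h1
      simp at h1
    rw [List.getElem?_eq_getElem hi0] at h1
    simp_all

-- A's (short-circuit) escape test equals B's, at an in-range index
lemma pvEscCond (l : List Char) (i : Nat) (hi : i < l.length) :
    ((i : Int) = 0 ∨ PySem.List.pyGet? l ((i : Int) - 1) ≠ some '\\') ↔
      (i = 0 ∨ l.getD (i - 1) ' ' ≠ '\\') := by
  rcases Nat.eq_zero_or_pos i with h0 | h0
  · subst h0; simp
  · have hcast : ((i : Int) - 1) = ((i - 1 : Nat) : Int) := by omega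
    rw [hcast, PySem.List.pyGet?_natCast]
    have : i - 1 < l.length := by omega
    rw [List.getElem?_eq_getElem this, List.getD_eq_getElem?_getD, List.getElem?_eq_getElem this]
    constructor
    · rintro (h | h); · omega
      · exact Or.inr (by simpa using h)
    · rintro (h | h); · omega
      · exact Or.inr (by simpa using h)

-- filter machinery on sorted index lists
lemma pvHead_min {xs : List Nat} (hs : xs.Pairwise (· < ·)) {p : Nat → Bool} {a : Nat}
    {t : List Nat} (h : xs.filter p = a :: t) :
    a ∈ xs ∧ p a = true ∧ ∀ i ∈ xs, p i = true → a ≤ i := by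
  have hmem : a ∈ xs.filter p := h ▸ List.mem_cons_self
  have hps := hs.filter p
  rw [h] at hps
  refine ⟨(List.mem_filter.mp hmem).1, (List.mem_filter.mp hmem).2, ?_⟩
  intro i hi hp
  have : i ∈ a :: t := h ▸ List.mem_filter.mpr ⟨hi, hp⟩
  rcases List.mem_cons.mp this with rfl | hit
  · exact le_rfl
  · exact Nat.le_of_lt (List.rel_of_pairwise_cons hps hit)

lemma pvFilter_shift {xs : List Nat} (hs : xs.Pairwise (· < ·)) {c a : Nat} {t : List Nat}
    (h : xs.filter (fun i => decide (c ≤ i)) = a :: t) {c' : Nat} (hc : a < c') :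
    xs.filter (fun i => decide (c' ≤ i)) = t.filter (fun i => decide (c' ≤ i)) := by
  have hca : c ≤ a := by
    have := (pvHead_min hs h).2.1
    simpa using this
  have key : xs.filter (fun i => decide (c' ≤ i)) =
      (xs.filter (fun i => decide (c ≤ i))).filter (fun i => decide (c' ≤ i)) := by
    rw [List.filter_filter]
    refine (List.filter_congr ?_).symm
    intro x hx
    by_cases hx' : c' ≤ x <;> simp [hx'] <;> omega
  rw [key, h, List.filter_cons_of_neg (by simp; omega)]

lemma pvFilter_all {c : Nat} {t : List Nat} (hall : ∀ i ∈ t, c ≤ i) :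
    t.filter (fun i => decide (c ≤ i)) = t :=
  List.filter_eq_self.mpr fun i hi => by simpa using hall i hi

lemma pvDropWhile_filter {xs : List Nat} (hs : xs.Pairwise (· < ·)) (c : Nat) :
    xs.dropWhile (fun o => decide (o < c)) = xs.filter (fun o => decide (c ≤ o)) := by
  induction xs with
  | nil => rfl
  | cons x t ih =>
    by_cases hx : x < c
    · rw [List.dropWhile_cons_of_pos (by simpa using hx),
        List.filter_cons_of_neg (by simp; omega), ih hs.of_cons]
    · rw [List.dropWhile_cons_of_neg (by simpa using hx),
        List.filter_cons_of_pos (by simp; omega),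
        pvFilter_all (fun i hi => by have := List.rel_of_pairwise_cons hs hi; omega)]

-- characterization of the find loops by the index lists
lemma pvFstar (l : List Char) (pos : Nat) (hpos : pos ≤ l.length) :
    PySem.Chars.findFrom l ['*', '*'] (pos : Int) none =
      match (starIdxB l).filter (fun i => decide (pos ≤ i)) with
      | [] => -1
      | a :: _ => (a : Int) := by
  cases hf : (starIdxB l).filter (fun i => decide (pos ≤ i)) with
  | nil =>
    have hnone : ¬ (['*', '*'] <:+: l.drop pos) := by
      intro hinf
      rw [pvInfix_drop_iff] at hinf
      obtain ⟨j, hj⟩ := hinf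
      rw [List.drop_drop] at hj
      have hmem : pos + j ∈ starIdxB l := (pvMem_star l (pos + j)).mpr hj
      have : pos + j ∈ (starIdxB l).filter (fun i => decide (pos ≤ i)) :=
        List.mem_filter.mpr ⟨hmem, by simp⟩
      simp [hf] at this
    exact (PySem.Chars.findFrom_natCast_eq_neg_one_iff l _ pos hpos).mpr hnone
  | cons a t =>
    obtain ⟨hmem, hpa, hmin⟩ := pvHead_min (pvSorted_star l) hf
    have hpos_a : pos ≤ a := by simpa using hpa
    have hpre : ['*', '*'] <+: l.drop a := (pvMem_star l a).mp hmem
    have hinf : ['*', '*'] <:+: l.drop pos := by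
      rw [pvInfix_drop_iff]
      exact ⟨a - pos, by rw [List.drop_drop, show pos + (a - pos) = a by omega]; exact hpre⟩
    have hne : PySem.Chars.findFrom l ['*', '*'] (pos : Int) none ≠ -1 := fun heq =>
      ((PySem.Chars.findFrom_natCast_eq_neg_one_iff l _ pos hpos).mp heq) hinf
    obtain ⟨h1, h2, h3⟩ := PySem.Chars.findFrom_natCast_spec l ['*', '*'] pos hpos hne
    have hmemf : (PySem.Chars.findFrom l ['*', '*'] (pos : Int) none).toNat ∈ starIdxB l :=
      (pvMem_star l _).mpr h2
    have hle : a ≤ (PySem.Chars.findFrom l ['*', '*'] (pos : Int) none).toNat :=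
      hmin _ hmemf (by simp; omega)
    have hge : (PySem.Chars.findFrom l ['*', '*'] (pos : Int) none).toNat ≤ a := by
      by_contra hgt
      exact h3 a hpos_a (by omega) hpre
    simp only []
    omega

lemma pvFdollar (l : List Char) (pos : Nat) :
    findUnescA l pos =
      match (dollarIdxB l).filter (fun i => decide (pos ≤ i)) with
      | [] => -1
      | a :: _ => (a : Int) := by
  fun_induction findUnescA l pos with
  | case1 pos idx h0 =>
    have hidx : idx = PySem.Chars.findFrom l ['$'] (pos : Int) none := rfl
    have hfe : (dollarIdxB l).filter (fun i => decide (pos ≤ i)) = [] := by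
      rcases Nat.lt_or_ge l.length pos with hgt | hpos
      · refine List.filter_eq_nil_iff.mpr fun i hi => ?_
        simp only [dollarIdxB, List.mem_filter, List.mem_range] at hi
        simp
        omega
      · cases hf : (dollarIdxB l).filter (fun i => decide (pos ≤ i)) with
        | nil => rfl
        | cons a t =>
          obtain ⟨hmem, hpa, -⟩ := pvHead_min (pvSorted_dollar l) hf
          have hpre : ['$'] <+: l.drop a := ((pvMem_dollar l a).mp hmem).1
          have hinf : ['$'] <:+: l.drop pos := by
            rw [pvInfix_drop_iff]
            exact ⟨a - pos, by
              rw [List.drop_drop, show pos + (a - pos) = a by simp at hpa; omega]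
              exact hpre⟩
          have hne : PySem.Chars.findFrom l ['$'] (pos : Int) none ≠ -1 := fun heq =>
            ((PySem.Chars.findFrom_natCast_eq_neg_one_iff l _ pos hpos).mp heq) hinf
          obtain ⟨h1, -, -⟩ := PySem.Chars.findFrom_natCast_spec l ['$'] pos hpos hne
          rw [← hidx] at h1
          omega
    rw [hfe]
  | case2 pos idx h0 hcond =>
    have hidx : idx = PySem.Chars.findFrom l ['$'] (pos : Int) none := rfl
    have hb := pvFindFrom_bounds l ['$'] pos (by simp) (hidx ▸ h0)
    simp only [List.length_cons, List.length_nil] at hb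
    have hpos : pos ≤ l.length := hb.1
    have hne : PySem.Chars.findFrom l ['$'] (pos : Int) none ≠ -1 := by rw [← hidx]; omega
    obtain ⟨h1, h2, h3⟩ := PySem.Chars.findFrom_natCast_spec l ['$'] pos hpos hne
    rw [← hidx] at h1 h2 h3
    have hi : idx.toNat < l.length := by omega
    have hint : idx = ((idx.toNat : Nat) : Int) := by omega
    have hcond' : idx.toNat = 0 ∨ l.getD (idx.toNat - 1) ' ' ≠ '\\' := by
      rw [← pvEscCond l idx.toNat hi]
      rcases hcond with h | h
      · exact Or.inl (by omega)
      · exact Or.inr (by rw [← hint]; exact h)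
    have hmem : idx.toNat ∈ dollarIdxB l := (pvMem_dollar l idx.toNat).mpr ⟨h2, hcond'⟩
    cases hf : (dollarIdxB l).filter (fun i => decide (pos ≤ i)) with
    | nil =>
      have hin : idx.toNat ∈ (dollarIdxB l).filter (fun i => decide (pos ≤ i)) :=
        List.mem_filter.mpr ⟨hmem, by simp; omega⟩
      rw [hf] at hin
      cases hin
    | cons a t =>
      obtain ⟨hmema, hpa, hmin⟩ := pvHead_min (pvSorted_dollar l) hf
      have hpos_a : pos ≤ a := by simpa using hpa
      have hpre : ['$'] <+: l.drop a := ((pvMem_dollar l a).mp hmema).1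
      have hle : a ≤ idx.toNat := hmin _ hmem (by simp; omega)
      have hge : idx.toNat ≤ a := by
        by_contra hgt
        exact h3 a hpos_a (by omega) hpre
      simp only []
      omega
  | case3 pos idx h0 hcond ih =>
    have hidx : idx = PySem.Chars.findFrom l ['$'] (pos : Int) none := rfl
    have hb := pvFindFrom_bounds l ['$'] pos (by simp) (hidx ▸ h0)
    simp only [List.length_cons, List.length_nil] at hb
    have hpos : pos ≤ l.length := hb.1
    have hne : PySem.Chars.findFrom l ['$'] (pos : Int) none ≠ -1 := by rw [← hidx]; omega
    obtain ⟨h1, h2, h3⟩ := PySem.Chars.findFrom_natCast_spec l ['$'] pos hpos hne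
    rw [← hidx] at h1 h2 h3
    have hi : idx.toNat < l.length := by omega
    have hint : idx = ((idx.toNat : Nat) : Int) := by omega
    rw [not_or, not_not] at hcond
    have hesc : ¬ (idx.toNat = 0 ∨ l.getD (idx.toNat - 1) ' ' ≠ '\\') := by
      rw [← pvEscCond l idx.toNat hi]
      rw [not_or, not_not]
      exact ⟨by omega, by rw [← hint]; exact hcond.2⟩
    have hfe : (dollarIdxB l).filter (fun i => decide (pos ≤ i)) =
        (dollarIdxB l).filter (fun i => decide (idx.toNat + 1 ≤ i)) := by
      refine List.filter_congr fun x hx => ?_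
      obtain ⟨hxpre, hxesc⟩ := (pvMem_dollar l x).mp hx
      by_cases hpx : pos ≤ x
      · have : idx.toNat + 1 ≤ x := by
          rcases Nat.lt_or_ge x (idx.toNat + 1) with hlt | hge
          · rcases Nat.lt_or_ge x idx.toNat with hlt2 | hge2
            · exact absurd hxpre (h3 x hpx hlt2)
            · have : x = idx.toNat := by omega
              subst this
              exact absurd hxesc hesc
          · exact hge
        simp [hpx, this]
      · have : ¬ (idx.toNat + 1 ≤ x) := by omega
        simp [hpx, this]
    rw [hfe, ih]

-- unfold equations for greedyGoB
lemma pvGreedy_nil (acc : List (Nat × Nat)) : greedyGoB [] acc = acc := by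
  rw [greedyGoB.eq_def]

lemma pvGreedy_cons_nil {s : Nat} {rest : List Nat}
    (hdw : rest.dropWhile (fun o => decide (o < s + 2)) = []) (acc : List (Nat × Nat)) :
    greedyGoB (s :: rest) acc = acc := by
  rw [greedyGoB.eq_def]
  split
  · rfl
  · rename_i s' rest' heq
    injection heq with hq1 hq2
    subst hq1; subst hq2
    split
    · rfl
    · rename_i e rest2 hcontra
      rw [hdw] at hcontra
      cases hcontra

lemma pvGreedy_cons {s : Nat} {rest : List Nat} {e : Nat} {rest2 : List Nat}
    (hdw : rest.dropWhile (fun o => decide (o < s + 2)) = e :: rest2) (acc : List (Nat × Nat)) :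
    greedyGoB (s :: rest) acc =
      greedyGoB (rest2.dropWhile (fun o => decide (o < e + 2))) (acc ++ [(s, e)]) := by
  rw [greedyGoB.eq_def]
  split
  · simp_all
  · rename_i s' rest' heq
    injection heq with hq1 hq2
    subst hq1; subst hq2
    split
    · rename_i hcontra
      rw [hdw] at hcontra
      cases hcontra
    · rename_i e' rest2' hsame
      rw [hdw] at hsame
      injection hsame with hs1 hs2
      subst hs1; subst hs2
      rfl

-- accumulator extraction for the two pairing loops
lemma pvGreedy_acc : ∀ (n : Nat) (stack : List Nat), stack.length ≤ n →
    ∀ acc, greedyGoB stack acc = acc ++ greedyGoB stack [] := by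
  intro n
  induction n with
  | zero =>
    intro stack h acc
    have : stack = [] := by simpa using List.length_eq_zero_iff.mp (by omega)
    subst this; simp [pvGreedy_nil]
  | succ n ih =>
    intro stack h acc
    rcases stack with _ | ⟨s, rest⟩
    · simp [pvGreedy_nil]
    · cases hdw : rest.dropWhile (fun o => decide (o < s + 2)) with
      | nil => simp [pvGreedy_cons_nil hdw]
      | cons e rest2 =>
        have hlen : rest2.length < rest.length := by
          have := List.length_dropWhile_le (fun o => decide (o < s + 2)) rest
          rw [hdw] at this; simp at this; omega
        have hlen2 := List.length_dropWhile_le (fun o => decide (o < e + 2)) rest2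
        rw [pvGreedy_cons hdw, pvGreedy_cons hdw,
          ih _ (by simp at h ⊢; omega) (acc ++ [(s, e)]),
          ih _ (by simp at h ⊢; omega) ([] ++ [(s, e)])]
        simp

lemma pvPairUp_acc : ∀ (stack : List Nat) (acc : List (Nat × Nat)),
    pairUpGoB stack acc = acc ++ pairUpGoB stack [] := by
  suffices h : ∀ (n : Nat) (stack : List Nat), stack.length ≤ n →
      ∀ acc, pairUpGoB stack acc = acc ++ pairUpGoB stack [] by
    intro stack acc; exact h stack.length stack le_rfl acc
  intro n
  induction n with
  | zero =>
    intro stack h acc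
    have : stack = [] := by simpa using List.length_eq_zero_iff.mp (by omega)
    subst this; simp [pairUpGoB]
  | succ n ih =>
    intro stack h acc
    rcases stack with _ | ⟨a, _ | ⟨b, r⟩⟩
    · simp [pairUpGoB]
    · simp [pairUpGoB]
    · show pairUpGoB r (acc ++ [(a, b)]) = acc ++ pairUpGoB r ([] ++ [(a, b)])
      rw [ih r (by simp at h; omega) (acc ++ [(a, b)]), ih r (by simp at h; omega) ([] ++ [(a, b)])]
      simp

-- the common shape both programs compute, as a recursion over the chosen pairs
def segFold (l : List Char) : Nat → List (Nat × Nat) → List Char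
  | pos, [] => escB (List.drop pos l)
  | pos, (s, e) :: r =>
      escB ((l.drop pos).take (s - pos)) ++
        ("\\textbf{".toList ++ escB (PySem.Chars.strip ((l.drop (s + 2)).take (e - (s + 2)))) ++ ['}']) ++
        segFold l (e + 2) r

def mainFold (l : List Char) : Nat → List (Nat × Nat) → List Char
  | pos, [] => escSegB (List.drop pos l)
  | pos, (a, b) :: r =>
      escSegB ((l.drop pos).take (a - pos)) ++
        ('$' :: PySem.Chars.strip ((l.drop (a + 1)).take (b - (a + 1))) ++ ['$']) ++
        mainFold l (b + 1) r

-- A's bold loop computes segFold over the greedy pairs of the '**' index list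
lemma pvEscLoop_eq (l : List Char) (pos : Nat) (res : List (List Char)) :
    (escMdA_loop l pos res).flatten =
      res.flatten ++ segFold l pos (greedyGoB ((starIdxB l).filter (fun i => decide (pos ≤ i))) []) := by
  fun_induction escMdA_loop l pos res with
  | case1 pos res hlt start h0 =>
    have hst : start = PySem.Chars.findFrom l ['*', '*'] (pos : Int) none := rfl
    have hposle : pos ≤ l.length := Nat.le_of_lt hlt
    have hfe : (starIdxB l).filter (fun i => decide (pos ≤ i)) = [] := by
      cases hf : (starIdxB l).filter (fun i => decide (pos ≤ i)) with
      | nil => rfl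
      | cons a t =>
        have hFs := pvFstar l pos hposle
        rw [hf] at hFs
        simp only [] at hFs
        rw [hst] at h0
        rw [hFs] at h0
        exact absurd h0 (by simp)
    rw [hfe, pvGreedy_nil]
    simp [segFold, PySem.List.slice_from_natCast, pvEsc_eq, List.flatten_append]
  | case2 pos res hlt start h0 endd h1 =>
    have hst : start = PySem.Chars.findFrom l ['*', '*'] (pos : Int) none := rfl
    have hen : endd = PySem.Chars.findFrom l ['*', '*'] ((start.toNat + 2 : Nat) : Int) none := rfl
    have hposle : pos ≤ l.length := Nat.le_of_lt hlt
    obtain ⟨s, t, hf⟩ : ∃ s t, (starIdxB l).filter (fun i => decide (pos ≤ i)) = s :: t := by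
      cases hf : (starIdxB l).filter (fun i => decide (pos ≤ i)) with
      | nil =>
        have hFs := pvFstar l pos hposle
        rw [hf] at hFs
        simp only [] at hFs
        rw [hst] at h0
        rw [hFs] at h0
        exact absurd h0 (by simp)
      | cons a t => exact ⟨a, t, rfl⟩
    have hFs := pvFstar l pos hposle
    rw [hf] at hFs
    simp only [] at hFs
    have hs_val : start = (s : Int) := by rw [hst, hFs]
    have hstoNat : start.toNat = s := by omega
    have hsmem : s ∈ starIdxB l := (pvHead_min (pvSorted_star l) hf).1
    have hs2le : s + 2 ≤ l.length := by
      have := ((pvMem_star l s).mp hsmem).length_le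
      simp only [List.length_drop, List.length_cons, List.length_nil] at this
      omega
    have hsort_t : (s :: t).Pairwise (· < ·) := by
      rw [← hf]; exact (pvSorted_star l).filter _
    have ht1 : t.dropWhile (fun o => decide (o < s + 2)) =
        (starIdxB l).filter (fun i => decide (s + 2 ≤ i)) := by
      rw [pvDropWhile_filter hsort_t.of_cons (s + 2)]
      exact (pvFilter_shift (pvSorted_star l) hf (by omega)).symm
    have hFe := pvFstar l (s + 2) hs2le
    have hen2 : endd = PySem.Chars.findFrom l ['*', '*'] ((s + 2 : Nat) : Int) none := by
      rw [hen, hstoNat]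
    have hf2 : (starIdxB l).filter (fun i => decide (s + 2 ≤ i)) = [] := by
      cases hf2 : (starIdxB l).filter (fun i => decide (s + 2 ≤ i)) with
      | nil => rfl
      | cons e u =>
        rw [hf2] at hFe
        simp only [] at hFe
        rw [hen2] at h1
        rw [hFe] at h1
        exact absurd h1 (by simp)
    rw [hf, pvGreedy_cons_nil (by rw [ht1]; exact hf2)]
    simp [segFold, PySem.List.slice_from_natCast, pvEsc_eq, List.flatten_append]
  | case3 pos res hlt start h0 endd h1 ih =>
    have hst : start = PySem.Chars.findFrom l ['*', '*'] (pos : Int) none := rfl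
    have hen : endd = PySem.Chars.findFrom l ['*', '*'] ((start.toNat + 2 : Nat) : Int) none := rfl
    have hposle : pos ≤ l.length := Nat.le_of_lt hlt
    obtain ⟨s, t, hf⟩ : ∃ s t, (starIdxB l).filter (fun i => decide (pos ≤ i)) = s :: t := by
      cases hf : (starIdxB l).filter (fun i => decide (pos ≤ i)) with
      | nil =>
        have hFs := pvFstar l pos hposle
        rw [hf] at hFs
        simp only [] at hFs
        rw [hst] at h0
        rw [hFs] at h0
        exact absurd h0 (by simp)
      | cons a t => exact ⟨a, t, rfl⟩
    have hFs := pvFstar l pos hposle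
    rw [hf] at hFs
    simp only [] at hFs
    have hs_val : start = (s : Int) := by rw [hst, hFs]
    have hstoNat : start.toNat = s := by omega
    have hsmem : s ∈ starIdxB l := (pvHead_min (pvSorted_star l) hf).1
    have hpos_s : pos ≤ s := by
      have := (pvHead_min (pvSorted_star l) hf).2.1
      simpa using this
    have hs2le : s + 2 ≤ l.length := by
      have := ((pvMem_star l s).mp hsmem).length_le
      simp only [List.length_drop, List.length_cons, List.length_nil] at this
      omega
    have hsort_t : (s :: t).Pairwise (· < ·) := by
      rw [← hf]; exact (pvSorted_star l).filter _
    have ht1 : t.dropWhile (fun o => decide (o < s + 2)) =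
        (starIdxB l).filter (fun i => decide (s + 2 ≤ i)) := by
      rw [pvDropWhile_filter hsort_t.of_cons (s + 2)]
      exact (pvFilter_shift (pvSorted_star l) hf (by omega)).symm
    have hFe := pvFstar l (s + 2) hs2le
    have hen2 : endd = PySem.Chars.findFrom l ['*', '*'] ((s + 2 : Nat) : Int) none := by
      rw [hen, hstoNat]
    obtain ⟨e, u, hf2⟩ : ∃ e u, (starIdxB l).filter (fun i => decide (s + 2 ≤ i)) = e :: u := by
      cases hf2 : (starIdxB l).filter (fun i => decide (s + 2 ≤ i)) with
      | nil =>
        rw [hf2] at hFe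
        simp only [] at hFe
        rw [hen2] at h1
        rw [hFe] at h1
        exact absurd h1 (by simp)
      | cons e u => exact ⟨e, u, rfl⟩
    rw [hf2] at hFe
    simp only [] at hFe
    have hend_val : endd = (e : Int) := by rw [hen2, hFe]
    have hendtoNat : endd.toNat = e := by omega
    have hsort_u : (e :: u).Pairwise (· < ·) := by
      rw [← hf2]; exact (pvSorted_star l).filter _
    have hu1 : u.dropWhile (fun o => decide (o < e + 2)) =
        (starIdxB l).filter (fun i => decide (e + 2 ≤ i)) := by
      rw [pvDropWhile_filter hsort_u.of_cons (e + 2)]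
      exact (pvFilter_shift (pvSorted_star l) hf2 (by omega)).symm
    rw [hf, pvGreedy_cons (by rw [ht1]; exact hf2),
      pvGreedy_acc _ _ le_rfl, hu1]
    rw [ih]
    simp only [hs_val, hend_val, hstoNat, hendtoNat, Int.toNat_natCast]
    rw [PySem.List.slice_natCast, PySem.List.slice_natCast]
    simp [segFold, pvEsc_eq, List.flatten_append, List.append_assoc]
  | case4 pos res hge =>
    have hfe : (starIdxB l).filter (fun i => decide (pos ≤ i)) = [] := by
      refine List.filter_eq_nil_iff.mpr fun i hi => ?_
      simp only [starIdxB, List.mem_filter, List.mem_range] at hi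
      simp
      omega
    rw [hfe, pvGreedy_nil]
    have hdrop : List.drop pos l = [] := List.drop_eq_nil_of_le (by omega)
    simp [segFold, hdrop, escB]

-- B's segment fold computes segFold too
lemma pvSegFoldB_eq (seg : List Char) : ∀ (pairs : List (Nat × Nat)) (pos : Nat) (out : List (List Char)),
    (((pairs.foldl
        (fun (acc : Nat × List (List Char)) se =>
          (se.2 + 2, acc.2 ++ [escB (PySem.List.slice seg (some (acc.1 : Int)) (some (se.1 : Int))),
            "\\textbf{".toList ++
              escB (PySem.Chars.strip
                (PySem.List.slice seg (some ((se.1 + 2 : Nat) : Int)) (some (se.2 : Int)))) ++ ['}']]))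
        (pos, out)).2) ++
      [escB (PySem.List.slice seg
        (some (((pairs.foldl
          (fun (acc : Nat × List (List Char)) se =>
            (se.2 + 2, acc.2 ++ [escB (PySem.List.slice seg (some (acc.1 : Int)) (some (se.1 : Int))),
              "\\textbf{".toList ++
                escB (PySem.Chars.strip
                  (PySem.List.slice seg (some ((se.1 + 2 : Nat) : Int)) (some (se.2 : Int)))) ++ ['}']]))
          (pos, out)).1 : Nat) : Int)) none)]).flatten
      = out.flatten ++ segFold seg pos pairs := by
  intro pairs
  induction pairs with
  | nil =>
    intro pos out
    simp [segFold, PySem.List.slice_from_natCast, List.flatten_append]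
  | cons se r ih =>
    intro pos out
    obtain ⟨s, e⟩ := se
    simp only [List.foldl_cons]
    rw [ih, PySem.List.slice_natCast, PySem.List.slice_natCast]
    simp only [segFold, List.flatten_append, List.flatten_cons, List.flatten_nil,
      List.append_assoc, List.append_nil]

lemma pvSeg_eq (seg : List Char) : escMdA seg = escSegB seg := by
  unfold escMdA
  rw [pvEscLoop_eq]
  simp only [escSegB]
  rw [pvSegFoldB_eq]
  simp

-- A's main loop computes mainFold over the consecutive pairs of the '$' index list
lemma pvConvLoop_eq (l : List Char) (pos : Nat) (parts : List (List Char)) :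
    (convA_loop l pos parts).flatten =
      parts.flatten ++ mainFold l pos (pairUpGoB ((dollarIdxB l).filter (fun i => decide (pos ≤ i))) []) := by
  fun_induction convA_loop l pos parts with
  | case1 pos parts hlt start h0 =>
    have hst : start = findUnescA l pos := rfl
    have hFd := pvFdollar l pos
    have hfe : (dollarIdxB l).filter (fun i => decide (pos ≤ i)) = [] := by
      cases hf : (dollarIdxB l).filter (fun i => decide (pos ≤ i)) with
      | nil => rfl
      | cons a t =>
        rw [hf] at hFd
        simp only [] at hFd
        rw [hst, hFd] at h0
        exact absurd h0 (by simp)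
    rw [hfe]
    simp [pairUpGoB, mainFold, PySem.List.slice_from_natCast, pvSeg_eq, List.flatten_append]
  | case2 pos parts hlt start h0 endd h1 =>
    have hst : start = findUnescA l pos := rfl
    have hen : endd = findUnescA l (start.toNat + 1) := rfl
    have hFd := pvFdollar l pos
    obtain ⟨a, t, hf⟩ : ∃ a t, (dollarIdxB l).filter (fun i => decide (pos ≤ i)) = a :: t := by
      cases hf : (dollarIdxB l).filter (fun i => decide (pos ≤ i)) with
      | nil =>
        rw [hf] at hFd
        simp only [] at hFd
        rw [hst] at h0
        omega
      | cons a t => exact ⟨a, t, rfl⟩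
    rw [hf] at hFd
    simp only [] at hFd
    have hs_val : start = (a : Int) := by rw [hst, hFd]
    have hstoNat : start.toNat = a := by omega
    have hsort : (a :: t).Pairwise (· < ·) := by
      rw [← hf]; exact (pvSorted_dollar l).filter _
    cases t with
    | nil =>
      rw [hf]
      simp [pairUpGoB, mainFold, PySem.List.slice_from_natCast, pvSeg_eq, List.flatten_append]
    | cons b r =>
      exfalso
      have hFd2 := pvFdollar l (a + 1)
      have hshift : (dollarIdxB l).filter (fun i => decide (a + 1 ≤ i)) =
          (b :: r).filter (fun i => decide (a + 1 ≤ i)) :=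
        pvFilter_shift (pvSorted_dollar l) hf (by omega)
      have hall : (b :: r).filter (fun i => decide (a + 1 ≤ i)) = b :: r :=
        pvFilter_all fun i hi => by
          have := List.rel_of_pairwise_cons hsort hi
          omega
      rw [hshift, hall] at hFd2
      simp only [] at hFd2
      rw [hen, hstoNat, hFd2] at h1
      exact absurd h1 (by simp)
  | case3 pos parts hlt start h0 endd h1 ih =>
    have hst : start = findUnescA l pos := rfl
    have hen : endd = findUnescA l (start.toNat + 1) := rfl
    have hFd := pvFdollar l pos
    obtain ⟨a, t, hf⟩ : ∃ a t, (dollarIdxB l).filter (fun i => decide (pos ≤ i)) = a :: t := by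
      cases hf : (dollarIdxB l).filter (fun i => decide (pos ≤ i)) with
      | nil =>
        rw [hf] at hFd
        simp only [] at hFd
        rw [hst] at h0
        omega
      | cons a t => exact ⟨a, t, rfl⟩
    rw [hf] at hFd
    simp only [] at hFd
    have hs_val : start = (a : Int) := by rw [hst, hFd]
    have hstoNat : start.toNat = a := by omega
    have hsort : (a :: t).Pairwise (· < ·) := by
      rw [← hf]; exact (pvSorted_dollar l).filter _
    have hFd2 := pvFdollar l (a + 1)
    have hshift : (dollarIdxB l).filter (fun i => decide (a + 1 ≤ i)) =
        t.filter (fun i => decide (a + 1 ≤ i)) :=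
      pvFilter_shift (pvSorted_dollar l) hf (by omega)
    cases t with
    | nil =>
      exfalso
      rw [hshift] at hFd2
      simp only [List.filter_nil] at hFd2
      rw [hen, hstoNat, hFd2] at h1
      simp at h1
    | cons b r =>
      have hall : (b :: r).filter (fun i => decide (a + 1 ≤ i)) = b :: r :=
        pvFilter_all fun i hi => by
          have := List.rel_of_pairwise_cons hsort hi
          omega
      rw [hshift, hall] at hFd2
      simp only [] at hFd2
      have hend_val : endd = (b : Int) := by rw [hen, hstoNat, hFd2]
      have hendtoNat : endd.toNat = b := by omega
      have hfb : (dollarIdxB l).filter (fun i => decide (b + 1 ≤ i)) = r := by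
        have h_ab : (dollarIdxB l).filter (fun i => decide (a + 1 ≤ i)) = b :: r := by
          rw [hshift, hall]
        rw [pvFilter_shift (pvSorted_dollar l) h_ab (by omega)]
        refine pvFilter_all fun i hi => ?_
        have hsort2 : (b :: r).Pairwise (· < ·) := hsort.of_cons
        have := List.rel_of_pairwise_cons hsort2 hi
        omega
      rw [ih]
      simp only [hend_val, Int.toNat_natCast, hfb]
      rw [hf]
      have hpair : pairUpGoB (a :: b :: r) ([] : List (Nat × Nat)) = (a, b) :: pairUpGoB r [] := by
        show pairUpGoB r ([] ++ [(a, b)]) = _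
        rw [pvPairUp_acc r ([] ++ [(a, b)])]
        simp
      rw [hpair]
      simp only [hs_val, hstoNat]
      rw [PySem.List.slice_natCast, PySem.List.slice_natCast]
      simp [mainFold, pvSeg_eq, List.flatten_append, List.append_assoc]
  | case4 pos parts hge =>
    have hfe : (dollarIdxB l).filter (fun i => decide (pos ≤ i)) = [] := by
      refine List.filter_eq_nil_iff.mpr fun i hi => ?_
      simp only [dollarIdxB, List.mem_filter, List.mem_range] at hi
      simp
      omega
    rw [hfe]
    have hdrop : List.drop pos l = [] := List.drop_eq_nil_of_le (by omega)
    have hseg : escSegB [] = [] := by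
      simp [escSegB, starIdxB, pvGreedy_nil, escB, PySem.List.slice_from_natCast]
    simp [pairUpGoB, mainFold, hdrop, hseg]

-- B's main fold computes mainFold too
lemma pvMainFoldB_eq (l : List Char) : ∀ (pairs : List (Nat × Nat)) (pos : Nat) (out : List (List Char)),
    (((pairs.foldl
        (fun (acc : Nat × List (List Char)) ab =>
          (ab.2 + 1, acc.2 ++ [escSegB (PySem.List.slice l (some (acc.1 : Int)) (some (ab.1 : Int))),
            '$' :: PySem.Chars.strip
              (PySem.List.slice l (some ((ab.1 + 1 : Nat) : Int)) (some (ab.2 : Int))) ++ ['$']]))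
        (pos, out)).2) ++
      [escSegB (PySem.List.slice l
        (some (((pairs.foldl
          (fun (acc : Nat × List (List Char)) ab =>
            (ab.2 + 1, acc.2 ++ [escSegB (PySem.List.slice l (some (acc.1 : Int)) (some (ab.1 : Int))),
              '$' :: PySem.Chars.strip
                (PySem.List.slice l (some ((ab.1 + 1 : Nat) : Int)) (some (ab.2 : Int))) ++ ['$']]))
          (pos, out)).1 : Nat) : Int)) none)]).flatten
      = out.flatten ++ mainFold l pos pairs := by
  intro pairs
  induction pairs with
  | nil =>
    intro pos out
    simp [mainFold, PySem.List.slice_from_natCast, List.flatten_append]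
  | cons ab r ih =>
    intro pos out
    obtain ⟨a, b⟩ := ab
    simp only [List.foldl_cons]
    rw [ih, PySem.List.slice_natCast, PySem.List.slice_natCast]
    simp only [mainFold, List.flatten_append, List.flatten_cons, List.flatten_nil,
      List.append_assoc, List.append_nil]


-- ===== VERDICT (by name: the statement is the Claim_ definition above) =====
theorem convert_inline_markdown_py_spec : Claim_equal_convert_inline_markdown_py := by
  intro text _
  unfold Spec_convert_inline_markdown_py
  have hA : convert_inline_markdown_py text =
      String.ofList (PySem.Chars.strip (mainFold text.toList 0 (pairUpGoB (dollarIdxB text.toList) []))) := by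
    unfold convert_inline_markdown_py
    rw [pvConvLoop_eq]
    congr 3
    simp
  have hB : convert_inline_markdown_py_alt text =
      String.ofList (PySem.Chars.strip (mainFold text.toList 0 (pairUpGoB (dollarIdxB text.toList) []))) := by
    simp only [convert_inline_markdown_py_alt]
    rw [pvMainFoldB_eq]
    simp
  rw [hA, hB]
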